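-- pv_equiv track=rewrite | github.com/motanesku/scanner | app/parsers/filing_parser.py | detect_filing_sentiment
-- ===== SOURCE A (Python) =====
-- FILING_BULLISH_KEYWORDS = [
--     "agreement",
--     "contract",
--     "approval",
--     "acquisition",
--     "partnership",
--     "award",
--     "positive"
-- ]
--
-- FILING_BEARISH_KEYWORDS = [
--     "offering",
--     "dilution",
--     "shelf",
--     "bankruptcy",
--     "termination",
--     "lawsuit",
--     "default"
-- ]
--
-- def detect_filing_sentiment(text: str):
--     bullish_hits = sum(1 for kw in FILING_BULLISH_KEYWORDS if kw in text)
--     bearish_hits = sum(1 for kw in FILING_BEARISH_KEYWORDS if kw in text)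
--
--     if bullish_hits > bearish_hits:
--         return "bullish"
--     elif bearish_hits > bullish_hits:
--         return "bearish"
--     return "neutral"
-- ===== SOURCE B (Python) =====
-- _FILING_PATTERNS = [
--     ("agreement", 1), ("contract", 1), ("approval", 1), ("acquisition", 1),
--     ("partnership", 1), ("award", 1), ("positive", 1),
--     ("offering", -1), ("dilution", -1), ("shelf", -1), ("bankruptcy", -1),
--     ("termination", -1), ("lawsuit", -1), ("default", -1),
-- ]
--
-- def detect_filing_sentiment(text: str):
--     # Single left-to-right scan of the text: at each position, every still-unseen
--     # pattern that starts there is scored once and removed from the search set.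
--     remaining = list(_FILING_PATTERNS)
--     score = 0
--     i = 0
--     n = len(text)
--     while remaining and i < n:
--         still = []
--         for kw, w in remaining:
--             if text.startswith(kw, i):
--                 score += w
--             else:
--                 still.append((kw, w))
--         remaining = still
--         i += 1
--     if score > 0:
--         return "bullish"
--     if score < 0:
--         return "bearish"
--     return "neutral"
-- ===== Notes on version B (the rewrite author's own statement) =====
-- stated objective: alternative
-- what changed: Replaces A's keyword-driven passes (a substring-membership scan of the whole text per keyword, two counts compared) with one text-driven pass: a single left-to-right scan over text positions that checks which still-unseen patterns start at each position, removes matched patterns from the live set, and maintains a signed score whose sign is classified.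
import Mathlib
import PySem

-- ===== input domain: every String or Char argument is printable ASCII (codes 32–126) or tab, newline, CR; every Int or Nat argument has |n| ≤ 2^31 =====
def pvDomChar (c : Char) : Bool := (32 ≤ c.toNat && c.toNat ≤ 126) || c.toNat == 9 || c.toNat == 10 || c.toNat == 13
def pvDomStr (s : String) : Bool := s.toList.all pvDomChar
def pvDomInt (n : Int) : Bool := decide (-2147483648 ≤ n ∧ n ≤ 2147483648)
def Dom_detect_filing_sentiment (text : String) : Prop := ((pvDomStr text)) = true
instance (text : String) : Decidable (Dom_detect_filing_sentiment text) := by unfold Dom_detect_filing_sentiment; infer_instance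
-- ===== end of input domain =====

-- B replaces A's per-keyword whole-text membership passes with one text-driven scan
-- (shrinking live-pattern set, signed score); objective: alternative.

-- ===== PORT A =====
def FILING_BULLISH_KEYWORDS : List String :=
  ["agreement", "contract", "approval", "acquisition", "partnership", "award", "positive"]

def FILING_BEARISH_KEYWORDS : List String :=
  ["offering", "dilution", "shelf", "bankruptcy", "termination", "lawsuit", "default"]

def detect_filing_sentiment (text : String) : String :=
  let bullish_hits : Int :=
    FILING_BULLISH_KEYWORDS.foldl (fun acc kw => if PySem.Str.isIn kw text then acc + 1 else acc) 0
  let bearish_hits : Int :=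
    FILING_BEARISH_KEYWORDS.foldl (fun acc kw => if PySem.Str.isIn kw text then acc + 1 else acc) 0
  if bullish_hits > bearish_hits then "bullish"
  else if bearish_hits > bullish_hits then "bearish"
  else "neutral"

-- ===== PORT B =====
def FILING_PATTERNS : List (List Char × Int) :=
  [("agreement".toList, 1), ("contract".toList, 1), ("approval".toList, 1), ("acquisition".toList, 1),
   ("partnership".toList, 1), ("award".toList, 1), ("positive".toList, 1),
   ("offering".toList, -1), ("dilution".toList, -1), ("shelf".toList, -1), ("bankruptcy".toList, -1),
   ("termination".toList, -1), ("lawsuit".toList, -1), ("default".toList, -1)]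

-- the inner `for kw, w in remaining` loop of Source B: text.startswith(kw, i) ported by hand as
-- List.isPrefixOf on the current suffix (exact: both test code-point-wise prefix at position i);
-- returns (score, still)
def pvStep : List (List Char × Int) → List Char → Int → Int × List (List Char × Int)
  | [], _, score => (score, [])
  | p :: ps, s, score =>
      if p.1.isPrefixOf s then pvStep ps s (score + p.2)
      else
        let r := pvStep ps s score
        (r.1, p :: r.2)

-- the `while remaining and i < n` loop: position i is represented by the suffix text[i:]
def pvScan : List Char → List (List Char × Int) → Int → Int
  | _, [], score => score
  | [], _, score => score
  | c :: rest, remaining, score =>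
      let r := pvStep remaining (c :: rest) score
      pvScan rest r.2 r.1

def detect_filing_sentiment_alt (text : String) : String :=
  let score : Int := pvScan text.toList FILING_PATTERNS 0
  if score > 0 then "bullish"
  else if score < 0 then "bearish"
  else "neutral"

-- ===== PRECONDITION & SPEC =====
def Spec_detect_filing_sentiment (text : String) (out : String) : Prop := out = detect_filing_sentiment_alt text
instance (text : String) (out : String) : Decidable (Spec_detect_filing_sentiment text out) := by unfold Spec_detect_filing_sentiment; infer_instance

-- ===== CLAIM (what is proved, stated in full; the proofs are below) =====
def Claim_equal_detect_filing_sentiment : Prop := ∀ (text : String), Dom_detect_filing_sentiment text → Spec_detect_filing_sentiment text (detect_filing_sentiment text)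

-- ===== LEMMAS AND PROOFS =====

theorem pvStep_spec (s : List Char) : ∀ (ps : List (List Char × Int)) (score : Int),
    pvStep ps s score =
      (score + ((ps.filter (fun p => p.1.isPrefixOf s)).map Prod.snd).sum,
       ps.filter (fun p => !(p.1.isPrefixOf s))) := by
  intro ps
  induction ps with
  | nil => intro score; simp [pvStep]
  | cons p ps ih =>
      intro score
      by_cases h : p.1.isPrefixOf s
      · simp [pvStep, h, ih]
        ring
      · simp [pvStep, h, ih]

theorem sum_filter_or {α : Type} (f g : α → Bool) (w : α → Int) : ∀ (l : List α),
    ((l.filter (fun x => f x || g x)).map w).sum =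
      ((l.filter f).map w).sum + (((l.filter (fun x => !f x)).filter g).map w).sum := by
  intro l
  induction l with
  | nil => simp
  | cons a l ih =>
      cases hf : f a <;> cases hg : g a <;>
        simp [hf, hg, ih] <;> ring

theorem pvScan_spec : ∀ (s : List Char) (rem : List (List Char × Int)) (score : Int),
    (∀ p ∈ rem, p.1 ≠ []) →
    pvScan s rem score = score + ((rem.filter (fun p => PySem.Chars.isIn p.1 s)).map Prod.snd).sum := by
  intro s
  induction s with
  | nil =>
      intro rem score hne
      have hfil : rem.filter (fun p => PySem.Chars.isIn p.1 ([] : List Char)) = [] := by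
        rw [List.filter_eq_nil_iff]
        intro p hp
        simp only [Bool.not_eq_true]
        rw [PySem.Chars.isIn_eq_false_iff]
        intro hinf
        exact hne p hp (List.eq_nil_of_infix_nil hinf)
      cases rem with
      | nil => simp [pvScan]
      | cons q qs => simp [pvScan, hfil]
  | cons c rest ih =>
      intro rem score hne
      cases rem with
      | nil => simp [pvScan]
      | cons q qs =>
          have heq : pvScan (c :: rest) (q :: qs) score =
              pvScan rest (pvStep (q :: qs) (c :: rest) score).2
                (pvStep (q :: qs) (c :: rest) score).1 := rfl
          rw [heq, pvStep_spec]
          dsimp only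
          rw [ih _ _ (by
            intro p hp
            exact hne p (List.mem_of_mem_filter hp))]
          have hpt : ∀ p ∈ q :: qs,
              (PySem.Chars.isIn p.1 (c :: rest)) =
                (p.1.isPrefixOf (c :: rest) || PySem.Chars.isIn p.1 rest) := by
            intro p _
            by_cases h : p.1.isPrefixOf (c :: rest) = true
            · have hin : PySem.Chars.isIn p.1 (c :: rest) = true :=
                Iff.mpr (PySem.Chars.isIn_iff_infix _ _)
                  (List.IsPrefix.isInfix (List.isPrefixOf_iff_prefix.mp h))
              simp [hin, h]
            · rw [Bool.not_eq_true] at h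
              cases hr : PySem.Chars.isIn p.1 rest
              · have hin : PySem.Chars.isIn p.1 (c :: rest) = false := by
                  rw [PySem.Chars.isIn_eq_false_iff]
                  intro hinf
                  rcases List.infix_cons_iff.mp hinf with hp | hi
                  · rw [List.isPrefixOf_iff_prefix.mpr hp] at h; cases h
                  · rw [PySem.Chars.isIn_eq_false_iff] at hr; exact hr hi
                simp [hin, h]
              · have hin : PySem.Chars.isIn p.1 (c :: rest) = true := by
                  rw [PySem.Chars.isIn_iff_infix]
                  exact List.infix_cons_iff.mpr
                    (Or.inr (Iff.mp (PySem.Chars.isIn_iff_infix _ _) hr))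
                simp [hin, h]
          rw [List.filter_congr hpt, sum_filter_or]
          ring

theorem sum_map_filter_ifs (q : List Char × Int → Bool) : ∀ (l : List (List Char × Int)),
    ((l.filter q).map Prod.snd).sum = l.foldr (fun p acc => (if q p then p.2 else 0) + acc) 0 := by
  intro l
  induction l with
  | nil => simp
  | cons a l ih =>
      by_cases h : q a <;> simp [h, ih]

-- ===== VERDICT (by name: the statement is the Claim_ definition above) =====
set_option maxHeartbeats 1000000 in
theorem detect_filing_sentiment_spec : Claim_equal_detect_filing_sentiment := by
  intro text _
  unfold Spec_detect_filing_sentiment detect_filing_sentiment detect_filing_sentiment_alt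
    FILING_BULLISH_KEYWORDS FILING_BEARISH_KEYWORDS
  rw [pvScan_spec _ _ _ (by decide), sum_map_filter_ifs]
  unfold FILING_PATTERNS
  simp only [List.foldr, List.foldl, PySem.Str.isIn_eq]
  have hpos : ∀ (c : Bool) (s : Int), (if c = true then s + 1 else s) = s + (if c = true then (1:Int) else 0) := by
    intro c s; cases c <;> simp
  have hneg : ∀ (c : Bool), (if c = true then (-1:Int) else 0) = 0 - (if c = true then (1:Int) else 0) := by
    intro c; cases c <;> simp
  simp only [hpos, hneg, zero_add]
  generalize (if PySem.Chars.isIn "agreement".toList text.toList = true then (1:Int) else 0) = x1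
  generalize (if PySem.Chars.isIn "contract".toList text.toList = true then (1:Int) else 0) = x2
  generalize (if PySem.Chars.isIn "approval".toList text.toList = true then (1:Int) else 0) = x3
  generalize (if PySem.Chars.isIn "acquisition".toList text.toList = true then (1:Int) else 0) = x4
  generalize (if PySem.Chars.isIn "partnership".toList text.toList = true then (1:Int) else 0) = x5
  generalize (if PySem.Chars.isIn "award".toList text.toList = true then (1:Int) else 0) = x6
  generalize (if PySem.Chars.isIn "positive".toList text.toList = true then (1:Int) else 0) = x7
  generalize (if PySem.Chars.isIn "offering".toList text.toList = true then (1:Int) else 0) = x8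
  generalize (if PySem.Chars.isIn "dilution".toList text.toList = true then (1:Int) else 0) = x9
  generalize (if PySem.Chars.isIn "shelf".toList text.toList = true then (1:Int) else 0) = x10
  generalize (if PySem.Chars.isIn "bankruptcy".toList text.toList = true then (1:Int) else 0) = x11
  generalize (if PySem.Chars.isIn "termination".toList text.toList = true then (1:Int) else 0) = x12
  generalize (if PySem.Chars.isIn "lawsuit".toList text.toList = true then (1:Int) else 0) = x13
  generalize (if PySem.Chars.isIn "default".toList text.toList = true then (1:Int) else 0) = x14
  split_ifs <;> first | rfl | omega
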